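-- pv_equiv track=rewrite | github.com/Retrograd-Studios/eemb_gdb_bridge | main.py | playload2msg
-- ===== SOURCE A (Python) =====
-- def playload2msg(payload:str):
--     result = '$'
--     cksum = 0;
--
--     for char in payload:
--         cksum = (ord(char) + cksum) % 256;
--         result += char
--
--     result += '#'
--     result += hex(cksum)[2:].lower()
--     return result
-- ===== SOURCE B (Python) =====
-- def playload2msg(payload: str):
--     # Build a character-frequency table once, then compute the checksum as an
--     # order-independent weighted sum over the DISTINCT characters (correct
--     # because integer addition is commutative), and assemble the message in
--     # one concatenation.
--     freq = {}
--     for c in payload: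
--         freq[c] = freq.get(c, 0) + 1
--     cksum = sum(ord(c) * n for c, n in freq.items()) % 256
--     return '$' + payload + '#' + format(cksum, 'x')
-- ===== Notes on version B (the rewrite author's own statement) =====
-- stated objective: alternative
-- what changed: A fuses checksum accumulation and incremental string building in one char-by-char loop; B builds a character-frequency dict once and computes the checksum as a weighted sum ord(c)*count over the distinct characters (valid since addition is commutative), then assembles the message in a single concatenation.
import Mathlib
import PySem

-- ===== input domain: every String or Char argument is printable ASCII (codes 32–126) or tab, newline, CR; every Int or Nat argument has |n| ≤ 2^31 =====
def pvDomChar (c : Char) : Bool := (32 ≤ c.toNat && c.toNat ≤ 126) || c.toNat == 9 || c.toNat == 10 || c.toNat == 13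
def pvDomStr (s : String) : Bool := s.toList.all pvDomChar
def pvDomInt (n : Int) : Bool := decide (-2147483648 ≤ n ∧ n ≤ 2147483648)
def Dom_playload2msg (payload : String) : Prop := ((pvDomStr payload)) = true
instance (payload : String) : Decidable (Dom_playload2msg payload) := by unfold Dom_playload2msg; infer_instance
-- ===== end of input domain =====

-- B replaces A's fused char-by-char loop with a frequency-dict pass plus an
-- order-independent weighted checksum over distinct characters; objective: alternative.

-- hex digit character for n < 16 (exact: Python's hex()/format(...,'x') digits, lowercase)
def pvHexDigit (n : Nat) : Char := if n < 10 then Char.ofNat (48 + n) else Char.ofNat (87 + n)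

-- hex(n)[2:] for 0 ≤ n < 256 (the only values the checksum can take); exact there
def pvHexByte (n : Nat) : String :=
  if n < 16 then String.ofList [pvHexDigit n]
  else String.ofList [pvHexDigit (n / 16), pvHexDigit (n % 16)]

-- ===== PORT A =====
def playload2msg (payload : String) : String :=
  let st := payload.toList.foldl
    (fun (p : String × Int) ch =>
      (p.1.push ch, PySem.Int.mod ((ch.toNat : Int) + p.2) 256))
    ("$", 0)
  -- 'result += "#"; result += hex(cksum)[2:].lower()' — cksum is in [0,256), .toNat exact, hex digits already lowercase
  (st.1.push '#') ++ pvHexByte st.2.toNat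

-- ===== PORT B =====
def playload2msg_alt (payload : String) : String :=
  -- freq = {}; for c in payload: freq[c] = freq.get(c, 0) + 1
  let freq : PySem.Dict Char Int :=
    payload.toList.foldl (fun d c => d.insert c (d.getD c 0 + 1)) PySem.Dict.empty
  -- cksum = sum(ord(c) * n for c, n in freq.items()) % 256
  let cksum := PySem.Int.mod ((freq.items.map (fun p => (p.1.toNat : Int) * p.2)).sum) 256
  "$" ++ payload ++ "#" ++ pvHexByte cksum.toNat

-- ===== PRECONDITION & SPEC =====
def Spec_playload2msg (payload : String) (out : String) : Prop := out = playload2msg_alt payload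
instance (payload : String) (out : String) : Decidable (Spec_playload2msg payload out) := by unfold Spec_playload2msg; infer_instance

-- ===== CLAIM (what is proved, stated in full; the proofs are below) =====
def Claim_equal_playload2msg : Prop := ∀ (payload : String), Dom_playload2msg payload → Spec_playload2msg payload (playload2msg payload)

-- ===== LEMMAS AND PROOFS =====

-- A's loop, characterised: it appends the payload and sums the char codes mod 256.
theorem pv_loop_eq (l : List Char) : ∀ (r : String) (c : Int), 0 ≤ c → c < 256 →
    l.foldl (fun (p : String × Int) ch =>
      (p.1.push ch, PySem.Int.mod ((ch.toNat : Int) + p.2) 256)) (r, c)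
    = (r ++ String.ofList l, PySem.Int.mod (c + (l.map (fun ch => (ch.toNat : Int))).sum) 256) := by
  induction l with
  | nil =>
    intro r c h0 h1
    rw [PySem.Int.mod_eq_emod_of_pos (by omega)]
    simp [Int.emod_eq_of_lt h0 h1]
  | cons x xs ih =>
    intro r c h0 h1
    rw [List.foldl_cons,
      ih _ _ (PySem.Int.mod_nonneg _ (by omega)) (PySem.Int.mod_lt _ (by omega)),
      Prod.mk.injEq]
    refine ⟨?_, ?_⟩
    · rw [String.push_eq_append, String.append_assoc]
      congr 1
      apply String.toList_inj.mp
      simp [String.singleton]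
    · rw [PySem.Int.mod_eq_emod_of_pos (by omega), PySem.Int.mod_eq_emod_of_pos (by omega),
        PySem.Int.mod_eq_emod_of_pos (by omega)]
      simp [List.map_cons, List.sum_cons]
      omega

-- the weighted sum over distinct characters equals the plain sum of char codes
theorem pv_set_toFinset (l : List Char) : (PySem.Set.ofList l : List Char).toFinset = l.toFinset := by
  apply Finset.ext
  intro x
  simp [List.mem_toFinset, PySem.Set.mem_ofList]

theorem pv_weighted_sum (l : List Char) :
    ((PySem.Set.ofList l).map (fun k => (k.toNat : Int) * (l.count k : Int))).sum
      = (l.map (fun ch => (ch.toNat : Int))).sum := by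
  rw [Finset.sum_list_map_count l (fun ch => (ch.toNat : Int))]
  rw [← List.sum_toFinset _ (PySem.Set.nodup_ofList l), pv_set_toFinset]
  apply Finset.sum_congr rfl
  intro x _
  simp [mul_comm]

theorem playload2msg_spec : Claim_equal_playload2msg := by
  intro payload _
  unfold Spec_playload2msg playload2msg playload2msg_alt
  dsimp only
  rw [PySem.Dict.foldl_insert_getD_add_one_eq_counter,
    pv_loop_eq _ _ _ (by omega) (by omega)]
  show ("$" ++ String.ofList payload.toList).push '#' ++ _ = _
  rw [String.push_eq_append, String.ofList_toList, PySem.Dict.items_counter,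
    List.map_map]
  have : ((PySem.Set.ofList payload.toList).map
      ((fun p : Char × Int => (p.1.toNat : Int) * p.2) ∘ fun k => (k, (payload.toList.count k : Int)))).sum
      = (payload.toList.map (fun ch => (ch.toNat : Int))).sum := by
    simpa [Function.comp] using pv_weighted_sum payload.toList
  rw [this]
  apply String.toList_inj.mp
  simp [String.singleton]
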